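-- pv_equiv track=rewrite | github.com/NVIDIA/nvidia-resiliency-ext | src/nvidia_resiliency_ext/inprocess/utils.py | format_rank_set_verbose
-- ===== SOURCE A (Python) =====
-- def format_rank_set_verbose(ranks):
--     """
--     Format a set of ranks for logging using range compression (e.g., "1-3, 5, 7-9").
--
--     Args:
--         ranks: Set or list of rank numbers
--
--     Returns:
--         str: Formatted rank set string with ranges
--     """
--     if not ranks:
--         return "{}"
--
--     # Convert to sorted list of unique ranks
--     sorted_ranks = sorted(set(ranks))
--
--     # Compress consecutive ranks into ranges
--     ranges = []
--     if sorted_ranks: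
--         start = end = sorted_ranks[0]
--
--         for n in sorted_ranks[1:]:
--             if n == end + 1:
--                 end = n
--             else:
--                 ranges.append(f"{start}-{end}" if start != end else str(start))
--                 start = end = n
--
--         ranges.append(f"{start}-{end}" if start != end else str(start))
--
--     result = ", ".join(ranges)
--     return f"{{{result}}}"
-- ===== SOURCE B (Python) =====
-- def format_rank_set_verbose(ranks):
--     """
--     Format a set of ranks for logging using range compression (e.g., "1-3, 5, 7-9").
--
--     Groupby-by-invariant: each rank in the sorted unique list is keyed by
--     value - index, which is constant exactly on a maximal run of consecutive
--     ranks; grouping equal keys therefore yields the ranges directly, with no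
--     adjacency test or start/end tracking.
--     """
--     if not ranks:
--         return "{}"
--     runs = []
--     for i, v in enumerate(sorted(set(ranks))):
--         k = v - i
--         if runs and runs[-1][0] == k:
--             runs[-1][1].append(v)
--         else:
--             runs.append((k, [v]))
--     parts = [str(r[0]) if r[0] == r[-1] else f"{r[0]}-{r[-1]}" for _, r in runs]
--     return "{" + ", ".join(parts) + "}"
-- ===== Notes on version B (the rewrite author's own statement) =====
-- stated objective: alternative
-- what changed: Replaces A's stateful start/end adjacency loop with grouping by the value-minus-index invariant: each sorted-unique rank is keyed by v - i (constant exactly on a maximal consecutive run), the keyed list is recursively split into maximal equal-key groups, and each group is formatted from its first and last element.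
import Mathlib
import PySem

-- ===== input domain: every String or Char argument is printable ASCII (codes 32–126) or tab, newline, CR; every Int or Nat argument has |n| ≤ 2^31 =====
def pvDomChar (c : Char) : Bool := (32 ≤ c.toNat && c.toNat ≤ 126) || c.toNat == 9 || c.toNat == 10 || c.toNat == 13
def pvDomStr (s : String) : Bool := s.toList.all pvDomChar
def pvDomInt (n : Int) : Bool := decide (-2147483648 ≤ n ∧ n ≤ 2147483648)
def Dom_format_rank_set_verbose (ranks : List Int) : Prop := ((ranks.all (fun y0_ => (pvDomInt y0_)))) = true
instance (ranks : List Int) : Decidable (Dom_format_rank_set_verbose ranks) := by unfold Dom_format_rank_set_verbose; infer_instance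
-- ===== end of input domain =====

-- B replaces A's stateful start/end adjacency loop by grouping the sorted-unique ranks by the
-- value-minus-index key (constant exactly on a maximal consecutive run); alternative algorithm,
-- same cost; return values proved equal on the whole domain.

-- ===== PORT A =====
-- A's 'for n in sorted_ranks[1:]' loop over state (start, end, ranges); the [] case is
-- the 'ranges.append(...)' that follows the loop in A.
def pvALoop (rest : List Int) (start e : Int) (ranges : List String) : List String :=
  match rest with
  | [] => ranges ++ [if start ≠ e then PySem.Int.toStr start ++ "-" ++ PySem.Int.toStr e else PySem.Int.toStr start]
  | n :: t =>
    if n = e + 1 then pvALoop t start n ranges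
    else pvALoop t n n (ranges ++ [if start ≠ e then PySem.Int.toStr start ++ "-" ++ PySem.Int.toStr e else PySem.Int.toStr start])

def format_rank_set_verbose (ranks : List Int) : String :=
  if ranks = [] then "{}"
  else
    let sorted_ranks := PySem.List.sorted (PySem.Set.ofList ranks) (fun x => x) false
    let ranges := match sorted_ranks with
      | [] => []          -- Python's 'if sorted_ranks:' guard: ranges stays []
      | h :: t => pvALoop t h h []
    "{" ++ PySem.Str.join ", " ranges ++ "}"

-- ===== PORT B =====
-- one step of Source B's grouping loop: p = (i, v) from enumerate, k = v - i;
-- 'if runs and runs[-1][0] == k: runs[-1][1].append(v) else: runs.append((k, [v]))'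
-- (runs[-1] on the nonempty list is getLast?; the in-place append to the last
-- group is dropLast ++ [updated last])
def pvGroupStep (runs : List (Int × List Int)) (p : Int × Int) : List (Int × List Int) :=
  let k := p.2 - p.1
  match runs.getLast? with
  | some last => if last.1 = k then runs.dropLast ++ [(k, last.2 ++ [p.2])] else runs ++ [(k, [p.2])]
  | none => runs ++ [(k, [p.2])]

-- Source B's part formatting: str(r[0]) if r[0] == r[-1] else f"{r[0]}-{r[-1]}"
-- (r is a group built by the loop, hence nonempty, so the defaults are never read)
def pvFmtRun (r : List Int) : String :=
  if PySem.List.pyGetD r 0 0 = PySem.List.pyGetD r (-1) 0 then PySem.Int.toStr (PySem.List.pyGetD r 0 0)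
  else PySem.Int.toStr (PySem.List.pyGetD r 0 0) ++ "-" ++ PySem.Int.toStr (PySem.List.pyGetD r (-1) 0)

def format_rank_set_verbose_alt (ranks : List Int) : String :=
  if ranks = [] then "{}"
  else
    let xs := PySem.List.sorted (PySem.Set.ofList ranks) (fun x => x) false
    let runs := (PySem.List.enumerate xs 0).foldl pvGroupStep []
    "{" ++ PySem.Str.join ", " (runs.map (fun r => pvFmtRun r.2)) ++ "}"

-- ===== PRECONDITION & SPEC =====
def Spec_format_rank_set_verbose (ranks : List Int) (out : String) : Prop := out = format_rank_set_verbose_alt ranks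
instance (ranks : List Int) (out : String) : Decidable (Spec_format_rank_set_verbose ranks out) := by unfold Spec_format_rank_set_verbose; infer_instance

-- ===== CLAIM (what is proved, stated in full; the proofs are below) =====
def Claim_equal_format_rank_set_verbose : Prop := ∀ (ranks : List Int), Dom_format_rank_set_verbose ranks → Spec_format_rank_set_verbose ranks (format_rank_set_verbose ranks)

-- ===== LEMMAS AND PROOFS =====

-- the common formatting of one run (A's shape)
def pvFmt (s e : Int) : String :=
  if s ≠ e then PySem.Int.toStr s ++ "-" ++ PySem.Int.toStr e else PySem.Int.toStr s

-- reference for A: the list of formatted maximal runs, state (s, e) = current run bounds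
def pvRef (s e : Int) : List Int → List String
  | [] => [pvFmt s e]
  | n :: t => if n = e + 1 then pvRef s n t else pvFmt s e :: pvRef n n t

lemma pvALoop_eq_ref (t : List Int) (s e : Int) (acc : List String) :
    pvALoop t s e acc = acc ++ pvRef s e t := by
  induction t generalizing s e acc with
  | nil => simp [pvALoop, pvRef, pvFmt]
  | cons n t ih =>
    simp only [pvALoop, pvRef, pvFmt]
    split_ifs
    all_goals first
      | exact ih s n acc
      | (rw [ih n n]; simp)

-- reference for B: the keyed list (v - i, v), the equal-key prefix splitter, and runs by key
def pvKeyed (i : Int) : List Int → List (Int × Int)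
  | [] => []
  | v :: t => (v - i, v) :: pvKeyed (i + 1) t

def pvTR (k : Int) : List (Int × Int) → List Int × List (Int × Int)
  | [] => ([], [])
  | (k', v) :: t => if k' = k then ((v :: (pvTR k t).1), (pvTR k t).2) else ([], (k', v) :: t)

lemma pvTR_snd_le (k : Int) (l : List (Int × Int)) : (pvTR k l).2.length ≤ l.length := by
  induction l with
  | nil => simp [pvTR]
  | cons p t ih =>
    obtain ⟨k', v⟩ := p
    simp only [pvTR]
    split_ifs
    · exact le_trans ih (by simp)
    · simp

def pvRunsRef : List (Int × Int) → List (Int × List Int)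
  | [] => []
  | (k, v) :: t => (k, v :: (pvTR k t).1) :: pvRunsRef (pvTR k t).2
termination_by l => l.length
decreasing_by simpa using Nat.lt_succ_of_le (pvTR_snd_le k t)

-- run segmentation of a plain value list, from current end e
def pvRunSeg (e : Int) : List Int → List Int
  | [] => []
  | n :: t => if n = e + 1 then n :: pvRunSeg n t else []

def pvRunDrop (e : Int) : List Int → List Int
  | [] => []
  | n :: t => if n = e + 1 then pvRunDrop n t else n :: t

lemma pvRunDrop_le (e : Int) (t : List Int) : (pvRunDrop e t).length ≤ t.length := by
  induction t generalizing e with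
  | nil => simp [pvRunDrop]
  | cons n t ih =>
    simp only [pvRunDrop]
    split_ifs
    · exact le_trans (ih n) (by simp)
    · simp

-- proof-side grouping step taking the key directly (pvGroupStep computes it from the pair)
def pvStep' (runs : List (Int × List Int)) (q : Int × Int) : List (Int × List Int) :=
  match runs.getLast? with
  | some last => if last.1 = q.1 then runs.dropLast ++ [(q.1, last.2 ++ [q.2])] else runs ++ [(q.1, [q.2])]
  | none => runs ++ [(q.1, [q.2])]

lemma foldl_pvGroupStep_eq (l : List (Int × Int)) : ∀ (acc : List (Int × List Int)),
    l.foldl pvGroupStep acc = (l.map (fun p => (p.2 - p.1, p.2))).foldl pvStep' acc := by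
  induction l with
  | nil => intro acc; rfl
  | cons p t ih => intro acc; simp only [List.foldl_cons, List.map_cons, ih]; rfl

-- B's grouping step on a state ending in group (k, run)
lemma pvStep'_concat (pre : List (Int × List Int)) (k : Int) (run : List Int) (p : Int × Int) :
    pvStep' (pre ++ [(k, run)]) p =
      if k = p.1 then pre ++ [(k, run ++ [p.2])]
      else (pre ++ [(k, run)]) ++ [(p.1, [p.2])] := by
  simp only [pvStep', List.getLast?_concat]
  split_ifs with h
  · subst h; simp
  · rfl

-- the fold groups maximal equal-key blocks
lemma pvFold_concat (t : List (Int × Int)) :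
    ∀ (pre : List (Int × List Int)) (k : Int) (run : List Int),
    t.foldl pvStep' (pre ++ [(k, run)]) =
      pre ++ [(k, run ++ (pvTR k t).1)] ++ pvRunsRef (pvTR k t).2 := by
  induction t with
  | nil => intro pre k run; simp [pvTR, pvRunsRef]
  | cons p t ih =>
    intro pre k run
    obtain ⟨k', v⟩ := p
    simp only [List.foldl_cons, pvStep'_concat, pvTR]
    by_cases h : k' = k
    · rw [if_pos (by simp [h]), if_pos h, ih pre k (run ++ [v])]
      simp
    · rw [if_neg (by simp [Ne.symm h]), if_neg h, ih (pre ++ [(k, run)]) k' [v]]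
      simp only [pvRunsRef]
      simp
lemma pvFold_eq_runsRef (l : List (Int × Int)) :
    l.foldl pvStep' [] = pvRunsRef l := by
  cases l with
  | nil => simp [pvRunsRef]
  | cons p t =>
    obtain ⟨k, v⟩ := p
    have h0 : pvStep' [] (k, v) = [] ++ [(k, [v])] := rfl
    simp only [List.foldl_cons, h0]
    rw [pvFold_concat t [] k [v]]
    simp [pvRunsRef]

-- keyed list of the enumerate-map in the port
lemma pvKeyed_eq (xs : List Int) : ∀ (i : Int),
    (PySem.List.enumerate xs i).map (fun p => (p.2 - p.1, p.2)) = pvKeyed i xs := by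
  induction xs with
  | nil => intro i; simp [pvKeyed]
  | cons v t ih => intro i; simp [PySem.List.enumerate_cons, pvKeyed, ih (i + 1)]

-- pvTR on a keyed tail splits exactly the consecutive run
lemma pvTR_keyed (t : List Int) : ∀ (e i : Int), ∃ j,
    pvTR (e - i) (pvKeyed (i + 1) t) = (pvRunSeg e t, pvKeyed j (pvRunDrop e t)) := by
  induction t with
  | nil => intro e i; exact ⟨0, by simp [pvTR, pvKeyed, pvRunSeg, pvRunDrop]⟩
  | cons n t ih =>
    intro e i
    by_cases h : n = e + 1
    · have hk : n - (i + 1) = e - i := by omega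
      obtain ⟨j, hj⟩ := ih n (i + 1)
      rw [hk] at hj
      refine ⟨j, ?_⟩
      simp only [pvKeyed, pvTR, pvRunSeg, pvRunDrop, if_pos h, if_pos hk, hj]
    · have hk : ¬ n - (i + 1) = e - i := by omega
      refine ⟨i + 1, ?_⟩
      simp only [pvKeyed, pvTR, pvRunSeg, pvRunDrop, if_neg h, if_neg hk]

-- formatting a nonempty group from its first and last element is A's pvFmt
lemma pvFmtRun_cons (v : Int) (seg : List Int) :
    pvFmtRun (v :: seg) = pvFmt v (seg.getLastD v) := by
  have h1 : PySem.List.pyGetD (v :: seg) (-1) 0 = seg.getLastD v := by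
    rw [PySem.List.pyGetD_neg_one (v :: seg) 0 (List.cons_ne_nil v seg)]
    exact List.getLast_eq_getLastD (List.cons_ne_nil v seg)
  simp only [pvFmtRun, pvFmt, PySem.List.pyGetD_zero_cons, h1]
  by_cases h : v = seg.getLastD v
  · rw [if_pos h, if_neg (by simpa using h)]
  · rw [if_neg h, if_pos h]

-- A's reference splits at the same place
lemma pvRef_split (t : List Int) : ∀ (s e : Int),
    pvRef s e t = pvFmt s ((pvRunSeg e t).getLastD e) ::
      (match pvRunDrop e t with | [] => [] | n :: t' => pvRef n n t') := by
  induction t with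
  | nil => intro s e; simp [pvRef, pvRunSeg, pvRunDrop]
  | cons n t ih =>
    intro s e
    simp only [pvRef, pvRunSeg, pvRunDrop]
    by_cases h : n = e + 1
    · rw [if_pos h, if_pos h, if_pos h, ih s n, List.getLastD_cons]
    · rw [if_neg h, if_neg h, if_neg h]
      rfl

-- main B lemma: formatted runs of the keyed list are A's reference
lemma pvRunsRef_keyed_aux (N : Nat) : ∀ (t : List Int), t.length ≤ N → ∀ (v i : Int),
    (pvRunsRef (pvKeyed i (v :: t))).map (fun r => pvFmtRun r.2) = pvRef v v t := by
  induction N with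
  | zero =>
    intro t ht v i
    have : t = [] := List.eq_nil_of_length_eq_zero (Nat.le_zero.mp ht)
    subst this
    simp [pvKeyed, pvRunsRef, pvTR, pvRef, pvFmtRun_cons]
  | succ N ih =>
    intro t ht v i
    show (pvRunsRef ((v - i, v) :: pvKeyed (i + 1) t)).map (fun r => pvFmtRun r.2) = pvRef v v t
    obtain ⟨j, hj⟩ := pvTR_keyed t v i
    rw [pvRunsRef, hj]
    simp only [List.map_cons, pvFmtRun_cons]
    rw [pvRef_split t v v]
    cases hdrop : pvRunDrop v t with
    | nil => simp [pvKeyed, pvRunsRef]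
    | cons n t' =>
      have hlt : t'.length ≤ N := by
        have := pvRunDrop_le v t
        rw [hdrop] at this
        simp at this
        omega
      rw [ih t' hlt n j]

lemma pvRunsRef_keyed (t : List Int) (v i : Int) :
    (pvRunsRef (pvKeyed i (v :: t))).map (fun r => pvFmtRun r.2) = pvRef v v t :=
  pvRunsRef_keyed_aux t.length t le_rfl v i

-- ===== VERDICT (by name: the statement is the Claim_ definition above) =====
theorem format_rank_set_verbose_spec : Claim_equal_format_rank_set_verbose := by
  intro ranks _
  show format_rank_set_verbose ranks = format_rank_set_verbose_alt ranks
  by_cases hnil : ranks = []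
  · simp [format_rank_set_verbose, format_rank_set_verbose_alt, hnil]
  · have hne : PySem.List.sorted (PySem.Set.ofList ranks) (fun x => x) false ≠ [] := by
      rw [Ne, PySem.List.sorted_eq_nil_iff]
      intro hofl
      obtain ⟨r, rs, rfl⟩ := List.exists_cons_of_ne_nil hnil
      have hr : r ∈ PySem.Set.ofList (r :: rs) := by
        rw [← PySem.List.dedup_eq_ofList, PySem.List.mem_dedup]
        exact List.mem_cons_self
      rw [hofl] at hr
      exact absurd hr List.not_mem_nil
    obtain ⟨h, t, hht⟩ := List.exists_cons_of_ne_nil hne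
    unfold format_rank_set_verbose format_rank_set_verbose_alt
    rw [if_neg hnil, if_neg hnil, hht]
    show ("{" ++ PySem.Str.join ", " (pvALoop t h h []) ++ "}" : String)
        = "{" ++ PySem.Str.join ", "
            ((((PySem.List.enumerate (h :: t) 0).foldl pvGroupStep []).map (fun r => pvFmtRun r.2))) ++ "}"
    congr 2
    rw [pvALoop_eq_ref, foldl_pvGroupStep_eq, pvKeyed_eq, pvFold_eq_runsRef, pvRunsRef_keyed t h 0]
    simp
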